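-- pv_equiv track=rewrite | github.com/sudeeshna21/DTE | editview.py | strarray_to_string
-- ===== SOURCE A (Python) =====
-- def strarray_to_string(arr):
--     """Convert an array of strings into a single single-quote space-delimited string
--
--     This function converts a list of strings into a single string. To do so, it first escapes the string where necessary
--     (the characters that are escaped are the backslash, single quote, and tab), and then encloses the escaped string in
--     single quotes, and finally joins the entire string list with spaces such that each string is separated by a space.
--     For example, given a user input list ["one'", "two"], the output will be the string "'one\'' 'two'".
--
--     This function is the counterpart/does the opposite of string_to_strarray(), although string_to_strarray() is capable
--     of parsing a wider range of inputs than this function produces (e.g. two spaces separating different strings is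
--     fine for string_to_strarray(), but this function will not do that).
--
--     :param arr: list of strings
--     :return: string representing the given `arr`
--     """
--
--     def escape_helper(mystr):
--         """helper function to escape the characters that need escaping"""
--
--         # things that need to be escaped (use this order so that we don't replace \t into \\\\t)
--         mystr = mystr.replace('\\', '\\\\')
--         mystr = mystr.replace('\'', '\\\'')
--         mystr = mystr.replace('\t', '\\t')
--         return mystr
--
--     # escape each string and add the single quotes around it
--     ret = ['\'' + escape_helper(elem) + '\'' for elem in arr]
--
--     # the output of this function is a string in the format 'str\t1\'' 'str\n2' '\\str_3'
--     return ' '.join(ret)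
-- ===== SOURCE B (Python) =====
-- def strarray_to_string(arr):
--     """Single streaming pass: emit quotes, escaped character chunks and separators
--     into one output buffer, instead of escaping each string with staged replace
--     passes and joining a list of quoted strings."""
--     out = []
--     first = True
--     for elem in arr:
--         if first:
--             first = False
--         else:
--             out.append(' ')
--         out.append("'")
--         for ch in elem:
--             if ch == '\\':
--                 out.append('\\\\')
--             elif ch == "'":
--                 out.append("\\'")
--             elif ch == '\t':
--                 out.append('\\t')
--             else:
--                 out.append(ch)
--         out.append("'")
--     return ''.join(out)
-- ===== Notes on version B (the rewrite author's own statement) =====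
-- stated objective: alternative
-- what changed: Replaced the staged per-element pipeline (three chained .replace passes, quote each string, join the list with spaces) by one streaming pass that walks the characters once and emits separators, quotes and escape chunks into a single output buffer.
import Mathlib
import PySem

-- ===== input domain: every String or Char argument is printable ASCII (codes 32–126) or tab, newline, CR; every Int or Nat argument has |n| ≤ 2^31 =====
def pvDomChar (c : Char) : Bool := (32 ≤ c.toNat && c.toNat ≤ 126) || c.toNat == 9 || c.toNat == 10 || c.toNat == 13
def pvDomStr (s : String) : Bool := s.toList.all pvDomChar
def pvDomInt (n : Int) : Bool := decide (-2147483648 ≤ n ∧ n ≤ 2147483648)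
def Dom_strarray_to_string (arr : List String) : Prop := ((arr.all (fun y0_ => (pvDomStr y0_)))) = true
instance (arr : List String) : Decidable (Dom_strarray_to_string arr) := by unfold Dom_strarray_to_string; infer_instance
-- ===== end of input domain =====

-- B builds the whole output in one streaming pass (separator/quote/escape chunks into a single
-- buffer) instead of A's staged per-element replace passes + quoting + join; identical output.

-- ===== PORT A =====
-- escape_helper: three chained str.replace calls (ported over code points via PySem.Chars.replace, exact)
def pvEscapeA (s : List Char) : List Char :=
  let s1 := PySem.Chars.replace s ['\\'] ['\\', '\\']
  let s2 := PySem.Chars.replace s1 ['\''] ['\\', '\'']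
  PySem.Chars.replace s2 ['\t'] ['\\', 't']

def strarray_to_string (arr : List String) : String :=
  let ret := arr.map (fun elem => String.ofList ('\'' :: pvEscapeA elem.toList ++ ['\'']))
  PySem.Str.join " " ret

-- ===== PORT B =====
-- the escape chunk emitted for one character (the body of B's inner loop)
def pvChunk (c : Char) : String :=
  if c = '\\' then "\\\\"
  else if c = '\'' then "\\'"
  else if c = '\t' then "\\t"
  else String.ofList [c]

-- the loop body: state = (first flag, output buffer of emitted pieces)
def pvStepB (st : Bool × List String) (elem : String) : Bool × List String :=
  let out := if st.1 then st.2 else st.2 ++ [" "]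
  let out := out ++ ["'"]
  let out := elem.toList.foldl (fun o ch => o ++ [pvChunk ch]) out
  (false, out ++ ["'"])

def strarray_to_string_alt (arr : List String) : String :=
  PySem.Str.join "" (arr.foldl pvStepB (true, [])).2

-- ===== PRECONDITION & SPEC =====
def Spec_strarray_to_string (arr : List String) (out : String) : Prop := out = strarray_to_string_alt arr
instance (arr : List String) (out : String) : Decidable (Spec_strarray_to_string arr out) := by unfold Spec_strarray_to_string; infer_instance

-- ===== CLAIM =====
def Claim_equal_strarray_to_string : Prop := ∀ (arr : List String), Dom_strarray_to_string arr → Spec_strarray_to_string arr (strarray_to_string arr)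

-- ===== LEMMAS AND PROOFS =====

-- per-character escape map (used only in the proofs, to characterise both sides)
def pvTr (c : Char) : List Char :=
  if c = '\\' then ['\\', '\\']
  else if c = '\'' then ['\\', '\'']
  else if c = '\t' then ['\\', 't']
  else [c]

-- replace with a single-character pattern is a per-character flatMap
theorem replace_go_single (a : Char) (new : List Char) :
    ∀ (fuel : Nat) (l acc : List Char), l.length ≤ fuel →
      PySem.Chars.replace.go [a] new fuel l acc
        = acc.reverse ++ l.flatMap (fun c => if c = a then new else [c]) := by
  intro fuel
  induction fuel with
  | zero =>
    intro l acc h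
    have : l = [] := List.length_eq_zero_iff.mp (Nat.le_zero.mp h)
    subst this
    simp [PySem.Chars.replace.go]
  | succ n ih =>
    intro l acc h
    cases l with
    | nil => simp [PySem.Chars.replace.go]
    | cons c t =>
      by_cases hc : c = a
      · subst hc
        have hpre : [c].isPrefixOf (c :: t) = true := by simp [List.isPrefixOf]
        simp only [PySem.Chars.replace.go, hpre, if_pos, List.length_cons, List.length_nil,
          List.drop_succ_cons, List.drop_zero]
        rw [ih _ _ (by simpa using Nat.le_of_succ_le_succ h)]
        simp
      · have hpre : [a].isPrefixOf (c :: t) = false := by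
          simp [List.isPrefixOf]
          exact fun h' => absurd h'.symm hc
        simp only [PySem.Chars.replace.go, hpre, Bool.false_eq_true, if_false]
        rw [ih _ _ (by simpa using Nat.le_of_succ_le_succ h)]
        simp [hc]

theorem replace_single (a : Char) (new s : List Char) :
    PySem.Chars.replace s [a] new = s.flatMap (fun c => if c = a then new else [c]) := by
  have : ([a] : List Char).isEmpty = false := by simp
  simp only [PySem.Chars.replace, this, Bool.false_eq_true, if_false]
  simpa using replace_go_single a new s.length s []

theorem escape_eq_flatMap (s : List Char) : pvEscapeA s = s.flatMap pvTr := by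
  unfold pvEscapeA
  rw [replace_single, replace_single, replace_single]
  simp only [List.flatMap_assoc]
  congr 1
  funext c
  by_cases h1 : c = '\\'
  · subst h1; decide
  · by_cases h2 : c = '\''
    · subst h2; decide
    · by_cases h3 : c = '\t'
      · subst h3; decide
      · simp [pvTr, h1, h2, h3]

theorem toList_pvChunk (c : Char) : (pvChunk c).toList = pvTr c := by
  unfold pvChunk pvTr
  by_cases h1 : c = '\\'
  · subst h1; decide
  · by_cases h2 : c = '\''
    · subst h2; decide
    · by_cases h3 : c = '\t'
      · subst h3; decide
      · simp [h1, h2, h3]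

-- B's inner loop appends one chunk per character
theorem inner_foldl (cs : List Char) (out : List String) :
    cs.foldl (fun o ch => o ++ [pvChunk ch]) out = out ++ cs.map pvChunk := by
  induction cs generalizing out with
  | nil => simp
  | cons c t ih => simp [ih]

-- the pieces B emits for one element, after the first
def pvPieces (e : String) : List String := "'" :: e.toList.map pvChunk ++ ["'"]

-- B's outer loop, once past the first element
theorem outer_foldl_false (arr : List String) (out : List String) :
    (arr.foldl pvStepB (false, out)).2
      = out ++ arr.flatMap (fun e => " " :: pvPieces e) := by
  induction arr generalizing out with
  | nil => simp
  | cons e t ih =>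
    simp only [List.foldl_cons, pvStepB, inner_foldl]
    simp only [Bool.false_eq_true, if_false]
    rw [ih]
    simp [pvPieces]

theorem outer_foldl (arr : List String) :
    (arr.foldl pvStepB (true, [])).2
      = match arr with
        | [] => []
        | e :: t => pvPieces e ++ t.flatMap (fun e => " " :: pvPieces e) := by
  cases arr with
  | nil => simp
  | cons e t =>
    simp only [List.foldl_cons, pvStepB, inner_foldl]
    rw [outer_foldl_false]
    simp [pvPieces]

-- joining with a space separator, unfolded to a flatMap
theorem join_space (a : List Char) (rest : List (List Char)) :
    PySem.Chars.join [' '] (a :: rest) = a ++ rest.flatMap (fun x => ' ' :: x) := by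
  induction rest generalizing a with
  | nil => simp [PySem.Chars.join_singleton]
  | cons b t ih => rw [PySem.Chars.join_cons_cons, ih]; simp

-- joining with the empty separator is flatten
theorem join_empty (l : List (List Char)) : PySem.Chars.join [] l = l.flatten := by
  induction l with
  | nil => simp [PySem.Chars.join_nil]
  | cons a t ih =>
    cases t with
    | nil => simp [PySem.Chars.join_singleton]
    | cons b u => rw [PySem.Chars.join_cons_cons, ih]; simp

-- the characters of the pieces emitted for one element
theorem flatten_toList_pvPieces (e : String) :
    ((pvPieces e).map String.toList).flatten = '\'' :: (e.toList.flatMap pvTr ++ ['\'']) := by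
  simp [pvPieces, List.map_map, Function.comp_def, toList_pvChunk, List.flatMap_def]

theorem flatten_toList_tail (t : List String) :
    ((t.flatMap (fun e => " " :: pvPieces e)).map String.toList).flatten
      = t.flatMap (fun x => ' ' :: '\'' :: (x.toList.flatMap pvTr ++ ['\''])) := by
  induction t with
  | nil => simp
  | cons b u ih =>
    simp only [List.flatMap_cons, List.map_append, List.map_cons, List.flatten_append,
      List.flatten_cons, flatten_toList_pvPieces, ih]
    simp

-- ===== VERDICT =====
theorem strarray_to_string_spec : Claim_equal_strarray_to_string := by
  intro arr _
  unfold Spec_strarray_to_string strarray_to_string strarray_to_string_alt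
  rw [outer_foldl]
  cases arr with
  | nil => rfl
  | cons e t =>
    apply String.toList_inj.mp
    simp only [PySem.Str.toList_join, List.map_map, List.map_cons,
      show (" " : String).toList = [' '] from rfl, show ("" : String).toList = [] from rfl]
    rw [join_space, join_empty]
    simp only [List.map_append, List.flatten_append, flatten_toList_pvPieces, flatten_toList_tail,
      Function.comp_def, String.toList_ofList, escape_eq_flatMap]
    simp [List.flatMap_def, List.map_map, Function.comp_def]
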